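-- pv_equiv track=rewrite | github.com/simonsandell/advent-of-code-2019 | 6/2.py | find_steps_between
-- ===== SOURCE A (Python) =====
-- def find_steps_between(path_1, path_2):
--     first_steps = 0
--     for i, planet in enumerate(path_1):
--         if planet in path_2:
--             first_steps = i
--             break
--     second_steps = 0
--     for i, planet in enumerate(path_2):
--         if planet in path_1:
--             second_steps = i
--             break
--     return first_steps + second_steps
-- ===== SOURCE B (Python) =====
-- def find_steps_between(path_1, path_2):
--     idx1 = {}
--     for i, p in enumerate(path_1):
--         idx1.setdefault(p, i)
--     idx2 = {}
--     for i, p in enumerate(path_2):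
--         idx2.setdefault(p, i)
--     common = set(idx1) & set(idx2)
--     first_steps = min((idx1[p] for p in common), default=0)
--     second_steps = min((idx2[p] for p in common), default=0)
--     return first_steps + second_steps
-- ===== Notes on version B (the rewrite author's own statement) =====
-- stated objective: alternative
-- what changed: Replaces A's two scan-until-first-match loops (each with an inner list-membership scan) by building first-occurrence index dictionaries for both paths once, intersecting their key sets, and taking min-reductions of the common keys' indices.
import Mathlib
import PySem

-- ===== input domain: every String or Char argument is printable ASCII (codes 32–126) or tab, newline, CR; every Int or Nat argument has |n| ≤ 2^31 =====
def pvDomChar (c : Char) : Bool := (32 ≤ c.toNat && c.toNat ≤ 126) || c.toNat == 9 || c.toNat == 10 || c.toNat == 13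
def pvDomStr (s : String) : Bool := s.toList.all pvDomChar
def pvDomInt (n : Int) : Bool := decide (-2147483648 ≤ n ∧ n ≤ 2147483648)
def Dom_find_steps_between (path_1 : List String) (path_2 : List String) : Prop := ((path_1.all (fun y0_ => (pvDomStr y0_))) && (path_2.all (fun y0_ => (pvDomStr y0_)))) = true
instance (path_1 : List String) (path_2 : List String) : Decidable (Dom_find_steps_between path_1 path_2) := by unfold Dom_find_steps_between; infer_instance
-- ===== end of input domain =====

-- B replaces A's two scan-until-first-match loops by first-occurrence index maps, their key intersection,
-- and a min-reduction over the common keys (objective: alternative decomposition, same return value).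

-- ===== PORT A =====
-- A's 'for i, planet in enumerate(path): if planet in other: result = i; break' loop (result 0 if no hit)
def pvLoopA (pairs : List (Int × String)) (other : List String) : Int :=
  match pairs with
  | [] => 0
  | (i, p) :: rest => if p ∈ other then i else pvLoopA rest other

def find_steps_between (path_1 : List String) (path_2 : List String) : Int :=
  let first_steps := pvLoopA (PySem.List.enumerate path_1 0) path_2
  let second_steps := pvLoopA (PySem.List.enumerate path_2 0) path_1
  first_steps + second_steps

-- ===== PORT B =====
-- 'idx = {}; for i, p in enumerate(path): idx.setdefault(p, i)'
def pvFirstOcc (path : List String) : PySem.Dict String Int :=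
  (PySem.List.enumerate path 0).foldl (fun d ip => d.setdefault ip.2 ip.1) PySem.Dict.empty

def find_steps_between_alt (path_1 : List String) (path_2 : List String) : Int :=
  let idx1 := pvFirstOcc path_1
  let idx2 := pvFirstOcc path_2
  -- common = set(idx1) & set(idx2); the two mins iterate it, which is order-independent
  let common : PySem.Set String :=
    PySem.Set.inter (PySem.Set.ofList (PySem.Dict.keys idx1)) (PySem.Set.ofList (PySem.Dict.keys idx2))
  let first_steps := PySem.List.minD (common.map (fun p => idx1.getD p 0)) (fun v => v) 0
  let second_steps := PySem.List.minD (common.map (fun p => idx2.getD p 0)) (fun v => v) 0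
  first_steps + second_steps

-- ===== PRECONDITION & SPEC =====
def Spec_find_steps_between (path_1 : List String) (path_2 : List String) (out : Int) : Prop := out = find_steps_between_alt path_1 path_2
instance (path_1 : List String) (path_2 : List String) (out : Int) : Decidable (Spec_find_steps_between path_1 path_2 out) := by unfold Spec_find_steps_between; infer_instance

-- ===== CLAIM (what is proved, stated in full; the proofs are below) =====
def Claim_equal_find_steps_between : Prop := ∀ (path_1 : List String) (path_2 : List String), Dom_find_steps_between path_1 path_2 → Spec_find_steps_between path_1 path_2 (find_steps_between path_1 path_2)

-- ===== LEMMAS AND PROOFS =====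

-- A's loop returns start + (index of the first element of xs that lies in ys), or 0 if there is none.
lemma pvLoopA_enumerate (xs ys : List String) (s : Int) :
    pvLoopA (PySem.List.enumerate xs s) ys
      = match xs.findIdx? (fun p => decide (p ∈ ys)) with
        | some k => s + (k : Int)
        | none => 0 := by
  induction xs generalizing s with
  | nil => simp [PySem.List.enumerate_nil, pvLoopA]
  | cons x xs ih =>
    rw [PySem.List.enumerate_cons]
    by_cases hx : x ∈ ys
    · simp [pvLoopA, hx, List.findIdx?_cons]
    · rw [List.findIdx?_cons]
      simp only [pvLoopA, hx, decide_eq_true_eq, ih (s + 1)]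
      rcases h : xs.findIdx? (fun p => decide (p ∈ ys)) with _ | k
      · simp
      · simp [Option.map_some]
        ring

-- The setdefault fold records, for each key absent from the start dict, its FIRST index in the list.
lemma pvFirstOcc_aux (xs : List String) (s : Int) (d : PySem.Dict String Int) (p : String) :
    ((PySem.List.enumerate xs s).foldl (fun d ip => d.setdefault ip.2 ip.1) d).get? p
      = if d.contains p then d.get? p
        else (PySem.List.index? xs p).map (fun n => s + (n : Int)) := by
  induction xs generalizing s d with
  | nil =>
    simp only [PySem.List.enumerate_nil, List.foldl_nil]
    split
    · rfl
    · rename_i hc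
      simp only [Bool.not_eq_true] at hc
      rw [PySem.Dict.contains_eq_isSome_get?] at hc
      simp at hc ⊢
      simp [hc]
  | cons x xs ih =>
    rw [PySem.List.enumerate_cons, List.foldl_cons, ih]
    by_cases hcx : d.contains p = true
    · -- p already present: the setdefault step cannot change its entry
      have h1 : (d.setdefault x s).contains p = true := by
        rw [PySem.Dict.contains_setdefault]; simp [hcx]
      rw [if_pos hcx, if_pos h1]
      by_cases hpx : p = x
      · subst hpx
        rw [PySem.Dict.get?_setdefault_self]
        rw [PySem.Dict.contains_eq_isSome_get?] at hcx
        rcases hg : d.get? p with _ | w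
        · simp [hg] at hcx
        · simp
      · rw [PySem.Dict.get?_setdefault_of_ne _ _ hpx]
    · rw [if_neg hcx]
      by_cases hpx : p = x
      · subst hpx
        have h1 : (d.setdefault p s).contains p = true := by
          rw [PySem.Dict.contains_setdefault]; simp
        rw [if_pos h1, PySem.Dict.get?_setdefault_self]
        have hg : d.get? p = none := by
          rw [PySem.Dict.contains_eq_isSome_get?] at hcx
          simpa using hcx
        rw [PySem.List.index?_cons_self]
        simp [hg]
      · have h1 : (d.setdefault x s).contains p = false := by
          rw [PySem.Dict.contains_setdefault]
          simp [hpx, hcx]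
        rw [if_neg (by simp [h1]),
            PySem.List.index?_cons_of_ne _ (fun h => hpx h.symm)]
        rcases hi : PySem.List.index? xs p with _ | n
        · simp
        · simp only [Option.map_some]
          simp
          ring

lemma pvFirstOcc_get? (xs : List String) (p : String) :
    (pvFirstOcc xs).get? p = (PySem.List.index? xs p).map (fun n => (n : Int)) := by
  rw [pvFirstOcc, pvFirstOcc_aux]
  simp [PySem.Dict.contains_empty]

lemma pvFirstOcc_contains (xs : List String) (p : String) :
    (pvFirstOcc xs).contains p = true ↔ p ∈ xs := by
  rw [PySem.Dict.contains_eq_isSome_get?, pvFirstOcc_get?]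
  rw [← PySem.List.index?_isSome_iff xs p]
  cases PySem.List.index? xs p <;> simp

lemma pvFirstOcc_mem_keys (xs : List String) (p : String) :
    p ∈ (pvFirstOcc xs).keys ↔ p ∈ xs := by
  rw [← PySem.Dict.contains_iff_mem_keys]
  exact pvFirstOcc_contains xs p

-- the common-keys set holds exactly the strings occurring in both paths
lemma pvCommon_mem (xs ys : List String) (p : String) :
    p ∈ PySem.Set.inter (PySem.Set.ofList (PySem.Dict.keys (pvFirstOcc xs)))
          (PySem.Set.ofList (PySem.Dict.keys (pvFirstOcc ys)))
      ↔ p ∈ xs ∧ p ∈ ys := by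
  rw [PySem.Set.inter, List.mem_filter]
  constructor
  · rintro ⟨h1, h2⟩
    refine ⟨(pvFirstOcc_mem_keys xs p).mp ((PySem.Set.mem_ofList _ _).mp h1), ?_⟩
    have : p ∈ PySem.Set.ofList (PySem.Dict.keys (pvFirstOcc ys)) := by
      simpa [PySem.Set.contains] using h2
    exact (pvFirstOcc_mem_keys ys p).mp ((PySem.Set.mem_ofList _ _).mp this)
  · rintro ⟨h1, h2⟩
    refine ⟨(PySem.Set.mem_ofList _ _).mpr ((pvFirstOcc_mem_keys xs p).mpr h1), ?_⟩
    simpa [PySem.Set.contains] using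
      (PySem.Set.mem_ofList _ _).mpr ((pvFirstOcc_mem_keys ys p).mpr h2)

-- B's min over first-occurrence indices of common elements equals A's first-hit scan.
lemma pvMin_eq_loop (xs ys common : List String)
    (hc : ∀ p, p ∈ common ↔ p ∈ xs ∧ p ∈ ys) :
    PySem.List.minD (common.map (fun p => (pvFirstOcc xs).getD p 0)) (fun v => v) 0
      = pvLoopA (PySem.List.enumerate xs 0) ys := by
  rw [pvLoopA_enumerate]
  rcases h : xs.findIdx? (fun p => decide (p ∈ ys)) with _ | k
  · -- no element of xs lies in ys: common is empty
    rw [List.findIdx?_eq_none_iff] at h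
    have hce : common = [] := by
      rw [List.eq_nil_iff_forall_not_mem]
      intro p hp
      rcases (hc p).mp hp with ⟨h1, h2⟩
      have := h p h1
      simp [h2] at this
    simp [hce, PySem.List.minD, PySem.List.min?]
  · rw [List.findIdx?_eq_some_iff_getElem] at h
    rcases h with ⟨hk, hky, hmin⟩
    simp only [decide_eq_true_eq] at hky hmin
    -- every common element's first index is ≥ k
    have hub : ∀ v ∈ common.map (fun p => (pvFirstOcc xs).getD p 0), (k : Int) ≤ v := by
      intro v hv
      rcases List.mem_map.mp hv with ⟨p, hp, rfl⟩
      rcases (hc p).mp hp with ⟨h1, h2⟩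
      rcases Option.isSome_iff_exists.mp ((PySem.List.index?_isSome_iff xs p).mpr h1)
        with ⟨j, hj⟩
      rcases PySem.List.getElem_of_index?_eq_some hj with ⟨hjl, hjv, _⟩
      have hkj : k ≤ j := by
        by_contra hlt
        exact hmin j (by omega) (hjv ▸ h2)
      rw [PySem.Dict.getD_eq_get?_getD, pvFirstOcc_get?, hj]
      simpa using hkj
    -- and index k itself is attained (by the element xs[k])
    have hmem : (k : Int) ∈ common.map (fun p => (pvFirstOcc xs).getD p 0) := by
      refine List.mem_map.mpr ⟨xs[k], (hc _).mpr ⟨List.getElem_mem hk, hky⟩, ?_⟩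
      rcases Option.isSome_iff_exists.mp
        ((PySem.List.index?_isSome_iff xs xs[k]).mpr (List.getElem_mem hk)) with ⟨j, hj⟩
      rcases PySem.List.getElem_of_index?_eq_some hj with ⟨hjl, hjv, hjfst⟩
      have hjk : j ≤ k := by
        by_contra hlt
        exact hjfst k (by omega) rfl
      have hkj : k ≤ j := by
        by_contra hlt
        exact hmin j (by omega) (hjv ▸ hky)
      have : j = k := by omega
      subst this
      rw [PySem.Dict.getD_eq_get?_getD, pvFirstOcc_get?, hj]
      rfl
    rcases hm : PySem.List.min? (common.map (fun p => (pvFirstOcc xs).getD p 0)) (fun v => v)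
      with _ | m
    · rw [PySem.List.min?_eq_none_iff] at hm
      rw [hm] at hmem
      simp at hmem
    · have h1 : m ≤ (k : Int) := PySem.List.min?_isMin hm _ hmem
      have h2 : (k : Int) ≤ m := hub m (PySem.List.min?_mem hm)
      have : m = (k : Int) := le_antisymm h1 h2
      simp [PySem.List.minD, hm, this]

-- ===== VERDICT (by name: the statement is the Claim_ definition above) =====
theorem find_steps_between_spec : Claim_equal_find_steps_between := by
  intro path_1 path_2 _
  unfold Spec_find_steps_between find_steps_between find_steps_between_alt
  rw [← pvMin_eq_loop path_1 path_2 _ (pvCommon_mem path_1 path_2),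
      ← pvMin_eq_loop path_2 path_1 _ (fun p => (pvCommon_mem path_1 path_2 p).trans and_comm)]
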